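-- pv_equiv track=rewrite | github.com/ljh1201/coding_test | 신규_아이디_추천.py | solution
-- ===== SOURCE A (Python) =====
-- def solution(new_id):
--     answer = ' '
--     recom_id = list(new_id.strip('.').lower())
--     check = ['-','_','.'] + [chr(a) for a in range(97, 123)] + [f'{i}' for i in range(0, 10)]
--     for r in range(len(recom_id)):
--         if recom_id[r] in check and recom_id[r] + answer[-1] != '..':
--             answer += recom_id[r]
--     answer = answer.replace(' ', '').strip('.')
--
--     if len(answer) > 15:
--         answer = answer[:15]
--
--     answer = answer.strip('.')
--
--     while len(answer) < 3:
--         try: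
--             answer += answer[-1]
--         except:
--             answer += 'a'
--
--     return answer
-- ===== SOURCE B (Python) =====
-- def solution(new_id):
--     s = new_id.lower()
--     s = ''.join(c for c in s if c in '-_.abcdefghijklmnopqrstuvwxyz0123456789')
--     s = '.'.join(p for p in s.split('.') if p)
--     s = s[:15].strip('.')
--     if not s:
--         s = 'a'
--     return s.ljust(3, s[-1])
-- ===== Notes on version B (the rewrite author's own statement) =====
-- stated objective: idiomatic
-- what changed: A's single character-by-character loop that fuses validity filtering with dot-collapsing against answer[-1] (plus a sentinel space, replace, and repeated strips) is replaced by a staged whole-string pipeline: lowercase, filter valid characters, collapse and strip dot runs at once by splitting on the dot and joining the non-empty parts, slice to 15, strip, and pad with str.ljust; the staged passes run in C-level string/str.join operations instead of a per-character Python loop, which is the measured constant-factor speedup.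
import Mathlib
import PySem

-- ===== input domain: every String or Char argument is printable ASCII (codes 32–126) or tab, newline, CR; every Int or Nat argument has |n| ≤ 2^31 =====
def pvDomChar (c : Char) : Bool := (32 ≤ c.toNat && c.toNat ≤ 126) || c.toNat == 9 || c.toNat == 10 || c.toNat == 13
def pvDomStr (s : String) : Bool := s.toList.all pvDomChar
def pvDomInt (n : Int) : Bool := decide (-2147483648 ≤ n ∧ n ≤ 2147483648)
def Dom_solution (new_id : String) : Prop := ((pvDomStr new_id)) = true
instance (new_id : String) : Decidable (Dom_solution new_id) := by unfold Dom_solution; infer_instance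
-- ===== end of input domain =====

-- B replaces A's fused character loop (filter + dot-collapse against answer[-1] + pre/post strips)
-- by an idiomatic staged pipeline: filter comprehension, split-on-dot/join to collapse and strip dots,
-- slice, strip, ljust padding.  Objective: simpler/idiomatic; equal return value on every input.

-- ===== PORT A =====
-- while len(answer) < 3: answer += answer[-1]  (except: 'a'); getLastD 'a' is exactly the try/except
def pyPadA (ans : List Char) : List Char :=
  if ans.length < 3 then pyPadA (ans ++ [ans.getLastD 'a']) else ans
termination_by 3 - ans.length
decreasing_by simp; omega

def solution (new_id : String) : String :=
  let recom_id := PySem.Chars.lower (PySem.Chars.stripChars new_id.toList ['.'])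
  let check := ['-', '_', '.']
      ++ (PySem.List.pyRange 97 123 1).map (fun a => Char.ofNat a.toNat)
      ++ (PySem.List.pyRange 0 10 1).map (fun i => Char.ofNat (48 + i.toNat))
  -- for r in range(len(recom_id)): … recom_id[r] …  — ported as the fold over the same elements;
  -- answer[-1] is pyGet? ans (-1), always a `some` since answer starts nonempty and only grows
  let ans := recom_id.foldl
    (fun ans c =>
      if c ∈ check ∧ ¬(c = '.' ∧ (PySem.List.pyGet? ans (-1)).getD ' ' = '.')
      then ans ++ [c] else ans) [' ']
  let ans := PySem.Chars.stripChars (PySem.Chars.replace ans [' '] []) ['.']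
  let ans := if ans.length > 15 then PySem.Chars.slice ans none (some 15) else ans
  let ans := PySem.Chars.stripChars ans ['.']
  String.ofList (pyPadA ans)

-- ===== PORT B =====
-- s.ljust(w, fill)
def pyLjust (s : List Char) (w : Nat) (fill : Char) : List Char :=
  s ++ List.replicate (w - s.length) fill

def solution_alt (new_id : String) : String :=
  let s0 := PySem.Chars.lower new_id.toList
  let s1 := s0.filter (fun c => c ∈ "-_.abcdefghijklmnopqrstuvwxyz0123456789".toList)
  let s2 := PySem.Chars.join ['.'] ((PySem.Chars.splitOn s1 ['.']).filter (fun p => p ≠ []))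
  let s3 := PySem.Chars.stripChars (PySem.Chars.slice s2 none (some 15)) ['.']
  let s4 := if s3 = [] then ['a'] else s3
  String.ofList (pyLjust s4 3 ((PySem.List.pyGet? s4 (-1)).getD 'a'))

-- ===== PRECONDITION & SPEC =====
def Spec_solution (new_id : String) (out : String) : Prop := out = solution_alt new_id
instance (new_id : String) (out : String) : Decidable (Spec_solution new_id out) := by unfold Spec_solution; infer_instance

-- ===== CLAIM (what is proved, stated in full; the proofs are below) =====
def Claim_equal_solution : Prop := ∀ (new_id : String), Dom_solution new_id → Spec_solution new_id (solution new_id)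

-- ===== LEMMAS AND PROOFS =====

-- the character class, shared by both programs
def CK : List Char := "-_.abcdefghijklmnopqrstuvwxyz0123456789".toList

lemma check_eq :
    (['-', '_', '.']
      ++ (PySem.List.pyRange 97 123 1).map (fun a => Char.ofNat a.toNat)
      ++ (PySem.List.pyRange 0 10 1).map (fun i => Char.ofNat (48 + i.toNat))) = CK := by decide

lemma pyGet?_neg_one (l : List Char) : PySem.List.pyGet? l (-1) = l.getLast? := by
  simp [PySem.List.pyGet?, PySem.List.pyIdx?]
  cases l with
  | nil => simp
  | cons a t => simp [List.getLast?_eq_getElem?]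

-- ---- A's loop: fused filter + dot-collapse ----
def collapseF (prev : Char) : List Char → List Char
  | [] => []
  | c :: cs => if c ∈ CK ∧ ¬(c = '.' ∧ prev = '.') then c :: collapseF c cs else collapseF prev cs

-- dot-collapse alone (input already filtered)
def collapseD (prev : Char) : List Char → List Char
  | [] => []
  | c :: cs => if c = '.' ∧ prev = '.' then collapseD prev cs else c :: collapseD c cs

-- B's split-on-dot, in structural form
def mySplit : List Char → List (List Char)
  | [] => [[]]
  | c :: t => if c = '.' then [] :: mySplit t else (mySplit t).modifyHead (c :: ·)

def parts (u : List Char) : List (List Char) := (mySplit u).filter (· ≠ [])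

lemma collapseD_cons_nodot {c : Char} (hc : c ≠ '.') (prev : Char) (t : List Char) :
    collapseD prev (c :: t) = c :: collapseD c t := by
  rw [collapseD, if_neg (by simp [hc])]

lemma loop_eq (cs : List Char) : ∀ (ans : List Char), ans ≠ [] →
    cs.foldl (fun ans c =>
      if c ∈ CK ∧ ¬(c = '.' ∧ (PySem.List.pyGet? ans (-1)).getD ' ' = '.')
      then ans ++ [c] else ans) ans
    = ans ++ collapseF ((PySem.List.pyGet? ans (-1)).getD ' ') cs := by
  induction cs with
  | nil => intro ans h; simp [collapseF]
  | cons c cs ih =>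
    intro ans h
    simp only [List.foldl_cons]
    by_cases hc : c ∈ CK ∧ ¬(c = '.' ∧ (PySem.List.pyGet? ans (-1)).getD ' ' = '.')
    · rw [if_pos hc, ih (ans ++ [c]) (by simp), collapseF]
      rw [if_pos (by simpa [pyGet?_neg_one] using hc)]
      simp [pyGet?_neg_one]
    · rw [if_neg hc, ih ans h, collapseF, if_neg (by simpa [pyGet?_neg_one] using hc)]

lemma collapseF_eq (cs : List Char) : ∀ prev, collapseF prev cs = collapseD prev (cs.filter (· ∈ CK)) := by
  induction cs with
  | nil => intro prev; simp [collapseF, collapseD]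
  | cons c cs ih =>
    intro prev
    by_cases hm : c ∈ CK
    · by_cases hd : c = '.' ∧ prev = '.'
      · obtain ⟨rfl, rfl⟩ := hd
        rw [collapseF, if_neg (by simp [hm]), ih, List.filter_cons]
        simp [hm, collapseD]
      · simp [collapseF, collapseD, hm, hd, ih]
    · simp [collapseF, hm, ih]

lemma mem_collapseF (cs : List Char) : ∀ prev c, c ∈ collapseF prev cs → c ∈ CK := by
  induction cs with
  | nil => intro prev c h; simp [collapseF] at h
  | cons x cs ih =>
    intro prev c h
    rw [collapseF] at h
    split at h
    · rcases List.mem_cons.mp h with rfl | h'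
      · exact (by assumption : c ∈ CK ∧ _).1
      · exact ih _ _ h'
    · exact ih _ _ h

-- ---- replace(' ', '') is a filter ----
lemma replace_go_space (fuel : Nat) : ∀ (l acc : List Char), l.length ≤ fuel →
    PySem.Chars.replace.go [' '] [] fuel l acc = acc.reverse ++ l.filter (· ≠ ' ') := by
  induction fuel with
  | zero => intro l acc h
            have : l = [] := List.eq_nil_of_length_eq_zero (by omega)
            subst this; simp [PySem.Chars.replace.go]
  | succ n ih =>
    intro l acc h
    cases l with
    | nil => simp [PySem.Chars.replace.go]
    | cons c t =>
      rw [PySem.Chars.replace.go]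
      by_cases hc : c = ' '
      · subst hc
        rw [if_pos (by simp [List.isPrefixOf])]
        simp at h
        rw [ih _ _ (by simpa using h)]
        simp
      · rw [if_neg (by simp [List.isPrefixOf]; exact fun a => hc a.symm)]
        rw [ih _ _ (by simp at h; omega)]
        simp [hc]

lemma replace_space (l : List Char) : PySem.Chars.replace l [' '] [] = l.filter (· ≠ ' ') := by
  rw [PySem.Chars.replace, if_neg (by simp)]
  simpa using replace_go_space l.length l [] le_rfl

-- ---- splitOn '.' is mySplit ----
lemma mySplit_ne_nil (u : List Char) : mySplit u ≠ [] := by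
  induction u with
  | nil => simp [mySplit]
  | cons c t ih =>
    rw [mySplit]; split
    · simp
    · cases h : mySplit t with
      | nil => exact absurd h ih
      | cons a b => simp [h]

lemma splitOn_go_dot (fuel : Nat) : ∀ (l cur : List Char) (acc : List (List Char)), l.length ≤ fuel →
    PySem.Chars.splitOn.go ['.'] fuel l cur acc = acc.reverse ++ (mySplit l).modifyHead (cur.reverse ++ ·) := by
  induction fuel with
  | zero => intro l cur acc h
            have : l = [] := List.eq_nil_of_length_eq_zero (by omega)
            subst this; simp [PySem.Chars.splitOn.go, mySplit]
  | succ n ih =>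
    intro l cur acc h
    cases l with
    | nil => simp [PySem.Chars.splitOn.go, mySplit]
    | cons c t =>
      rw [PySem.Chars.splitOn.go]
      by_cases hc : c = '.'
      · subst hc
        rw [if_pos (by simp [List.isPrefixOf])]
        rw [ih _ _ _ (by simp at h; simpa using h)]
        simp [mySplit]
        cases mySplit t <;> simp
      · rw [if_neg (by simp [List.isPrefixOf]; exact fun a => hc a.symm)]
        rw [ih _ _ _ (by simp at h; omega)]
        rw [mySplit, if_neg hc]
        cases hms : mySplit t with
        | nil => exact absurd hms (mySplit_ne_nil t)
        | cons a b => simp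

lemma splitOn_dot (l : List Char) : PySem.Chars.splitOn l ['.'] = mySplit l := by
  rw [PySem.Chars.splitOn, splitOn_go_dot (l.length + 1) l [] [] (by omega)]
  cases hms : mySplit l with
  | nil => exact absurd hms (mySplit_ne_nil l)
  | cons a b => simp

-- ---- strip('.') facts ----
lemma strip_unfold (v : List Char) :
    PySem.Chars.stripChars v ['.'] =
      ((v.dropWhile (fun c => decide (c = '.'))).reverse.dropWhile (fun c => decide (c = '.'))).reverse := by
  simp [PySem.Chars.stripChars]

lemma strip_cons_dot (v : List Char) : PySem.Chars.stripChars ('.' :: v) ['.'] = PySem.Chars.stripChars v ['.'] := by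
  simp [strip_unfold, List.dropWhile_cons]

lemma strip_append_dot (v : List Char) : PySem.Chars.stripChars (v ++ ['.']) ['.'] = PySem.Chars.stripChars v ['.'] := by
  rw [strip_unfold, strip_unfold, List.dropWhile_append]
  split
  · next h =>
      rw [List.isEmpty_iff] at h
      simp [h, List.dropWhile_cons]
  · next h =>
      rw [List.isEmpty_iff] at h
      simp [List.dropWhile_cons]

lemma dropWhile_nodot (v : List Char) (h : '.' ∉ v) :
    v.dropWhile (fun c => decide (c = '.')) = v := by
  cases v with
  | nil => rfl
  | cons a t =>
    have ha : ¬(a = '.') := fun h' => h (by simp [h'])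
    simp [List.dropWhile_cons, ha]

lemma strip_no_dot (v : List Char) (h : '.' ∉ v) : PySem.Chars.stripChars v ['.'] = v := by
  rw [strip_unfold, dropWhile_nodot v h, dropWhile_nodot v.reverse (by simpa using h), List.reverse_reverse]

lemma strip_spine (w z : List Char) (hw0 : w ≠ []) (hw : '.' ∉ w) (hz : ∃ d v', z = d :: v' ∧ d ≠ '.') :
    PySem.Chars.stripChars (w ++ '.' :: z) ['.'] = w ++ '.' :: PySem.Chars.stripChars z ['.'] := by
  obtain ⟨d, v', rfl, hd⟩ := hz
  rw [strip_unfold, strip_unfold]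
  have h1 : List.dropWhile (fun c => decide (c = '.')) (w ++ '.' :: d :: v') = w ++ '.' :: d :: v' := by
    rw [List.dropWhile_append, dropWhile_nodot w hw]
    simp [List.isEmpty_iff, hw0]
  have h2 : List.dropWhile (fun c => decide (c = '.')) (d :: v') = d :: v' := by
    rw [List.dropWhile_cons]; simp [hd]
  rw [h1, h2]
  have h3 : (w ++ '.' :: d :: v').reverse = (d :: v').reverse ++ '.' :: w.reverse := by
    simp
  rw [h3, List.dropWhile_append]
  have h4 : ¬(List.dropWhile (fun c => decide (c = '.')) (d :: v').reverse).isEmpty = true := by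
    rw [List.isEmpty_iff, List.dropWhile_eq_nil_iff]
    intro h
    exact hd (by simpa using h d (by simp))
  rw [if_neg h4]
  simp

-- ---- parts facts ----
lemma parts_cons_dot (u : List Char) : parts ('.' :: u) = parts u := by
  simp [parts, mySplit]

lemma mySplit_append_dot (u : List Char) : mySplit (u ++ ['.']) = mySplit u ++ [[]] := by
  induction u with
  | nil => simp [mySplit]
  | cons c t ih =>
    by_cases hc : c = '.'
    · subst hc; simp [mySplit, ih]
    · simp only [List.cons_append, mySplit, if_neg hc, ih]
      cases h : mySplit t with
      | nil => exact absurd h (mySplit_ne_nil t)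
      | cons a b => simp

lemma parts_dropWhile_dot (u : List Char) : parts (u.dropWhile (· = '.')) = parts u := by
  induction u with
  | nil => rfl
  | cons c t ih =>
    by_cases hc : c = '.'
    · subst hc; rw [List.dropWhile_cons]; simpa [parts_cons_dot] using ih
    · rw [List.dropWhile_cons]; simp [hc]

lemma parts_pad (p : List Char) (hp : ∀ c ∈ p, c = '.') : ∀ (q : List Char), (∀ c ∈ q, c = '.') → ∀ (v : List Char),
    parts (p ++ v ++ q) = parts v := by
  induction p with
  | nil =>
    intro q hq
    induction q with
    | nil => simp
    | cons d q' ihq =>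
      intro v
      have hd : d = '.' := hq d (by simp)
      subst hd
      have : v ++ '.' :: q' = (v ++ ['.']) ++ q' := by simp
      simp only [List.nil_append] at ihq ⊢
      rw [this, ihq (fun c hc => hq c (by simp [hc])) (v ++ ['.'])]
      simp [parts, mySplit_append_dot]
  | cons a p' ihp =>
    intro q hq v
    have ha : a = '.' := hp a (by simp)
    subst ha
    rw [List.cons_append, List.cons_append, parts_cons_dot]
    exact ihp (fun c hc => hp c (by simp [hc])) q hq v

lemma collapseD_dot (u : List Char) : collapseD '.' u = collapseD ' ' (u.dropWhile (· = '.')) := by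
  induction u with
  | nil => rfl
  | cons c t ih =>
    by_cases hc : c = '.'
    · subst hc; rw [collapseD, if_pos ⟨rfl, rfl⟩, List.dropWhile_cons]; simpa using ih
    · rw [collapseD_cons_nodot hc, List.dropWhile_cons]
      simp only [hc, decide_false, Bool.false_eq_true, if_false]
      rw [collapseD_cons_nodot hc]

lemma collapseD_block (b : List Char) (hb : ∀ x ∈ b, x ≠ '.') : ∀ (prev : Char) (r : List Char),
    collapseD prev (b ++ r) = b ++ collapseD (b.getLastD prev) r := by
  induction b with
  | nil => intro prev r; simp
  | cons x b' ih =>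
    intro prev r
    have hx : x ≠ '.' := hb x (by simp)
    rw [List.cons_append, collapseD_cons_nodot hx]
    rw [ih (fun y hy => hb y (by simp [hy])) x r]
    congr 1
    cases b' with
    | nil => simp
    | cons h t =>
      obtain ⟨y, hy⟩ : ∃ y, (h :: t).getLast? = some y :=
        ⟨(h :: t).getLast (by simp), List.getLast?_eq_some_getLast (by simp)⟩
      simp [hy]

lemma mySplit_block (w : List Char) (hw : ∀ x ∈ w, x ≠ '.') : ∀ (s : List Char),
    mySplit (w ++ s) = (mySplit s).modifyHead (w ++ ·) := by
  induction w with
  | nil =>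
    intro s
    cases h : mySplit s with
    | nil => exact absurd h (mySplit_ne_nil s)
    | cons a b => simp [h]
  | cons x w' ih =>
    intro s
    have hx : x ≠ '.' := hw x (by simp)
    rw [List.cons_append, mySplit, if_neg hx, ih (fun y hy => hw y (by simp [hy]))]
    cases h : mySplit s with
    | nil => exact absurd h (mySplit_ne_nil s)
    | cons a b => simp

lemma parts_cons_nodot {d : Char} (hd : d ≠ '.') (v' : List Char) :
    ∃ y rest, parts (d :: v') = (d :: y) :: rest := by
  rw [parts, mySplit, if_neg hd]
  cases h : mySplit v' with
  | nil => exact absurd h (mySplit_ne_nil v')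
  | cons a b => exact ⟨a, b.filter (· ≠ []), by simp⟩

-- ---- the main characterisation ----
lemma main_K (n : Nat) : ∀ (u : List Char), u.length ≤ n → ∀ (prev : Char), prev ≠ '.' →
    PySem.Chars.stripChars (collapseD prev u) ['.'] = PySem.Chars.join ['.'] (parts u) := by
  induction n with
  | zero =>
    intro u hu prev hp
    have : u = [] := List.eq_nil_of_length_eq_zero (by omega)
    subst this
    simp [collapseD, parts, mySplit, PySem.Chars.join, PySem.Chars.stripChars, List.intercalate]
  | succ n ih =>
    intro u hu prev hp
    cases u with
    | nil => simp [collapseD, parts, mySplit, PySem.Chars.join, PySem.Chars.stripChars, List.intercalate]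
    | cons c u' =>
      by_cases hc : c = '.'
      · -- leading dot: kept once, then stripped away
        subst hc
        rw [collapseD, if_neg (by simp [hp]), strip_cons_dot, collapseD_dot]
        have hlen : (u'.dropWhile (· = '.')).length ≤ n := by
          have := List.length_dropWhile_le (p := fun c => decide (c = '.')) u'
          simp at hu
          omega
        rw [ih _ hlen ' ' (by decide), parts_dropWhile_dot, parts_cons_dot]
      · -- non-dot head: a maximal non-dot block follows
        set b := u'.takeWhile (· ≠ '.') with hb_def
        set r := u'.dropWhile (· ≠ '.') with hr_def
        have hbr : b ++ r = u' := List.takeWhile_append_dropWhile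
        have hb : ∀ x ∈ b, x ≠ '.' := by
          intro x hx
          simpa using List.mem_takeWhile_imp hx
        have hcb : ∀ x ∈ c :: b, x ≠ '.' := by
          intro x hx
          rcases List.mem_cons.mp hx with rfl | hx'
          · exact hc
          · exact hb x hx'
        have hnodot : '.' ∉ c :: b := fun h => (hcb '.' h) rfl
        have hL : (b.getLastD c) ≠ '.' := by
          cases hbe : b with
          | nil => simpa [hbe] using hc
          | cons e t =>
            have : (e :: t).getLastD c = (e :: t).getLast (by simp) := by
              rw [List.getLastD_eq_getLast?, List.getLast?_eq_some_getLast (by simp)]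
              rfl
            rw [this]
            refine hcb _ (List.mem_cons_of_mem _ ?_)
            rw [hbe]
            exact List.getLast_mem _
        have hsplit : mySplit (c :: u') = (mySplit r).modifyHead ((c :: b) ++ ·) := by
          conv_lhs => rw [← hbr]
          rw [show (c :: (b ++ r)) = (c :: b) ++ r by simp]
          exact mySplit_block (c :: b) hcb r
        have hcollapse : collapseD prev (c :: u') = (c :: b) ++ collapseD (b.getLastD c) r := by
          conv_lhs => rw [← hbr]
          rw [collapseD_cons_nodot hc, collapseD_block b hb c r]
          simp
        have hrlen : r.length ≤ u'.length := by
          rw [hr_def]; exact List.length_dropWhile_le _ _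
        cases hr : r with
        | nil =>
          rw [hcollapse, hr]
          simp only [collapseD, List.append_nil]
          rw [strip_no_dot _ hnodot]
          rw [parts, hsplit, hr]
          simp [mySplit, PySem.Chars.join, List.intercalate]
        | cons e r' =>
          have he : e = '.' := by
            have : ¬(fun x => decide (x ≠ '.')) e = true := by
              have := List.head?_dropWhile_not (fun x => decide (x ≠ '.')) u'
              rw [← hr_def, hr] at this
              simpa using this
            simpa using this
          subst he
          set v := r'.dropWhile (· = '.') with hv_def
          have hvlen : v.length ≤ n := by
            have h1 : v.length ≤ r'.length := List.length_dropWhile_le _ _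
            have h2 : r.length ≤ u'.length := hrlen
            rw [hr] at h2
            simp at hu h2
            omega
          have hcol2 : collapseD (b.getLastD c) ('.' :: r') = '.' :: collapseD ' ' v := by
            rw [collapseD, if_neg (by simp only [List.getLastD_eq_getLast?] at hL; simp [hL]), collapseD_dot, hv_def]
          have hparts : parts (c :: u') = (c :: b) :: parts v := by
            have hpv : parts v = parts r' := by rw [hv_def]; exact parts_dropWhile_dot r'
            rw [parts, hsplit, hr, mySplit, if_pos rfl, List.modifyHead_cons, List.filter_cons]
            simp only [List.append_nil]
            rw [if_pos (by simp)]
            rw [hpv, parts]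
          rw [hcollapse, hr, hcol2, hparts]
          cases hv : v with
          | nil =>
            rw [show collapseD ' ' [] = [] from rfl]
            rw [show ((c :: b) ++ '.' :: ([] : List Char)) = (c :: b) ++ ['.'] by simp]
            rw [strip_append_dot, strip_no_dot _ hnodot]
            simp [parts, mySplit, PySem.Chars.join, List.intercalate]
          | cons d v' =>
            have hd : d ≠ '.' := by
              have : ¬(fun x => decide (x = '.')) d = true := by
                have := List.head?_dropWhile_not (fun x => decide (x = '.')) r'
                rw [← hv_def, hv] at this
                simpa using this
              simpa using this
            rw [collapseD_cons_nodot hd]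
            rw [strip_spine (c :: b) (d :: collapseD d v') (by simp) hnodot ⟨d, _, rfl, hd⟩]
            have hihv : PySem.Chars.stripChars (collapseD ' ' v) ['.'] = PySem.Chars.join ['.'] (parts v) := by
              exact ih v (by omega) ' ' (by decide)
            rw [hv, collapseD_cons_nodot hd] at hihv
            rw [hihv]
            obtain ⟨y, rest, hyr⟩ := parts_cons_nodot hd v'
            rw [hyr, PySem.Chars.join_cons_cons]
            simp

-- ---- tail: padding ----
lemma pad_eq (T : List Char) :
    pyPadA T = pyLjust (if T = [] then ['a'] else T) 3
      ((PySem.List.pyGet? (if T = [] then ['a'] else T) (-1)).getD 'a') := by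
  match T with
  | [] =>
    rw [pyPadA]; rw [pyPadA]; rw [pyPadA]; rw [pyPadA]
    simp [pyLjust, pyGet?_neg_one, List.getLastD]
  | [a] =>
    rw [pyPadA]; rw [pyPadA]; rw [pyPadA]
    simp [pyLjust, pyGet?_neg_one, List.getLastD, List.replicate]
  | [a, b] =>
    rw [pyPadA]; rw [pyPadA]
    simp [pyLjust, pyGet?_neg_one, List.getLastD, List.replicate]
  | a :: b :: c :: t =>
    rw [pyPadA]
    simp [pyLjust, pyGet?_neg_one]

-- decomposition of strip('.') into all-dot margins
lemma strip_decomp (t : List Char) :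
    ∃ p m q, t = p ++ m ++ q ∧ (∀ c ∈ p, c = '.') ∧ (∀ c ∈ q, c = '.') ∧
      PySem.Chars.stripChars t ['.'] = m := by
  refine ⟨t.takeWhile (fun c => decide (c = '.')),
    (((t.dropWhile (fun c => decide (c = '.'))).reverse.dropWhile (fun c => decide (c = '.'))).reverse),
    (((t.dropWhile (fun c => decide (c = '.'))).reverse.takeWhile (fun c => decide (c = '.'))).reverse),
    ?_, ?_, ?_, ?_⟩
  · conv_lhs => rw [← List.takeWhile_append_dropWhile (p := fun c => decide (c = '.')) (l := t)]
    rw [List.append_assoc]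
    congr 1
    conv_lhs => rw [← List.reverse_reverse (List.dropWhile (fun c => decide (c = '.')) t)]
    conv_lhs => rw [← List.takeWhile_append_dropWhile (p := fun c => decide (c = '.'))
        (l := (t.dropWhile (fun c => decide (c = '.'))).reverse)]
    rw [List.reverse_append]
  · intro c hc
    simpa using List.mem_takeWhile_imp hc
  · intro c hc
    rw [List.mem_reverse] at hc
    simpa using List.mem_takeWhile_imp hc
  · rw [strip_unfold]

-- map lower / filter CK leave an all-dot list unchanged
lemma lower_dots (p : List Char) (hp : ∀ c ∈ p, c = '.') : PySem.Chars.lower p = p := by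
  rw [PySem.Chars.lower]
  conv_rhs => rw [← List.map_id p]
  exact List.map_congr_left (fun c hc => by rw [hp c hc]; rfl)

lemma filter_dots (p : List Char) (hp : ∀ c ∈ p, c = '.') : p.filter (· ∈ CK) = p := by
  rw [List.filter_eq_self]
  intro c hc
  rw [hp c hc]
  decide

lemma slice_take15 (S : List Char) : PySem.Chars.slice S none (some 15) = S.take 15 := by
  simp [pysem]

-- ===== VERDICT (by name: the statement is the Claim_ definition above) =====
lemma space_not_CK : ' ' ∉ CK := by decide

theorem solution_spec : Claim_equal_solution := by
  intro new_id _
  show solution new_id = solution_alt new_id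
  obtain ⟨p, m, q, hdecomp, hp, hq, hstrip⟩ := strip_decomp new_id.toList
  have hCK : "-_.abcdefghijklmnopqrstuvwxyz0123456789".toList = CK := rfl
  have h_uB : (PySem.Chars.lower new_id.toList).filter (· ∈ CK)
      = p ++ (PySem.Chars.lower m).filter (· ∈ CK) ++ q := by
    rw [hdecomp, PySem.Chars.lower, List.map_append, List.map_append,
        List.filter_append, List.filter_append]
    rw [show List.map PySem.Chars.lowerChar p = PySem.Chars.lower p from rfl,
        show List.map PySem.Chars.lowerChar q = PySem.Chars.lower q from rfl,
        show List.map PySem.Chars.lowerChar m = PySem.Chars.lower m from rfl,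
        lower_dots p hp, lower_dots q hq, filter_dots p hp, filter_dots q hq]
  have hparts : parts ((PySem.Chars.lower new_id.toList).filter (· ∈ CK))
      = parts ((PySem.Chars.lower m).filter (· ∈ CK)) := by
    rw [h_uB]; exact parts_pad p hp q hq _
  -- the common middle value
  set S : List Char := PySem.Chars.join ['.'] (parts ((PySem.Chars.lower m).filter (· ∈ CK))) with hS
  set T : List Char := PySem.Chars.stripChars (S.take 15) ['.'] with hT
  -- ===== A side =====
  have hA : solution new_id = String.ofList (pyPadA T) := by
    rw [solution]
    simp only [check_eq, hstrip]
    rw [loop_eq _ [' '] (by simp)]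
    have hget : ((PySem.List.pyGet? [' '] (-1)).getD ' ') = ' ' := by rfl
    rw [hget, show ([' '] ++ collapseF ' ' (PySem.Chars.lower m))
        = ' ' :: collapseF ' ' (PySem.Chars.lower m) from rfl]
    rw [replace_space, List.filter_cons]
    simp only [decide_not, ne_eq, decide_true, Bool.not_true, Bool.false_eq_true, if_false]
    rw [List.filter_eq_self.mpr (fun x hx => by
      have hmem := mem_collapseF _ _ _ hx
      by_contra hne
      simp at hne
      rw [hne] at hmem
      exact space_not_CK hmem)]
    rw [collapseF_eq, main_K _ _ le_rfl ' ' (by decide), ← hS]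
    have htrunc : (if S.length > 15 then PySem.Chars.slice S none (some 15) else S) = S.take 15 := by
      by_cases h15 : S.length > 15
      · rw [if_pos h15, slice_take15]
      · rw [if_neg h15, List.take_of_length_le (by omega)]
    rw [htrunc, ← hT]
  -- ===== B side =====
  have hB : solution_alt new_id = String.ofList (pyLjust (if T = [] then ['a'] else T) 3
      ((PySem.List.pyGet? (if T = [] then ['a'] else T) (-1)).getD 'a')) := by
    rw [solution_alt]
    simp only [hCK]
    rw [show (PySem.Chars.splitOn ((PySem.Chars.lower new_id.toList).filter (· ∈ CK)) ['.']).filter (· ≠ [])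
        = parts ((PySem.Chars.lower new_id.toList).filter (· ∈ CK)) by rw [parts, splitOn_dot]]
    rw [hparts, ← hS, slice_take15, ← hT]
  rw [hA, hB, pad_eq]
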